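-- pv_equiv track=rewrite | github.com/SikhakolliNitishKumar/Job-scheduling | jobscheduling.py | suggest_best_method
-- ===== SOURCE A (Python) =====
-- def suggest_best_method(processes):
--     max_burst_time = max([p['burst_time'] for p in processes])
--     min_burst_time = min([p['burst_time'] for p in processes])
--     has_priority = any(p['priority'] != processes[0]['priority'] for p in processes)
--
--     if has_priority:
--         return "Priority Scheduling"
--     elif max_burst_time - min_burst_time > 5:  # Large difference in burst times
--         return "Shortest Job First"
--     else:
--         return "Round Robin"
-- ===== SOURCE B (Python) =====
-- def suggest_best_method(processes):
--     if len({p['priority'] for p in processes}) > 1: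
--         return "Priority Scheduling"
--     bursts = sorted(p['burst_time'] for p in processes)
--     if bursts[-1] - bursts[0] > 5:
--         return "Shortest Job First"
--     return "Round Robin"
-- ===== Notes on version B (the rewrite author's own statement) =====
-- stated objective: alternative
-- what changed: Detects mixed priorities by counting distinct priorities with a set instead of any() against the first element, and gets the burst-time spread from a sorted list's endpoints (bursts[-1]-bursts[0]) instead of separate max()/min() scans.
-- outside the precondition, e.g. on suggest_best_method([]): A raises ValueError, B raises IndexError
import Mathlib
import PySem

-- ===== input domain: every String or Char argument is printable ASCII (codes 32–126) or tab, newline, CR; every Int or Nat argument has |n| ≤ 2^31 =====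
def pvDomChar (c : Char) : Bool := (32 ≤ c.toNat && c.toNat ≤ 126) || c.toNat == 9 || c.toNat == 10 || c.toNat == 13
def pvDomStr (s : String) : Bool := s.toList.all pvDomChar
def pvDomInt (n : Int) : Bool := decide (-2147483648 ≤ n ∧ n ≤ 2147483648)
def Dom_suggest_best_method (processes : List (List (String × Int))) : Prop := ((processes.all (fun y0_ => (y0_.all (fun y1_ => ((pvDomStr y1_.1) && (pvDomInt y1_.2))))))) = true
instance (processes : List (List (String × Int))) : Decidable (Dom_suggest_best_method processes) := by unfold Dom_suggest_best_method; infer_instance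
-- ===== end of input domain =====

-- B replaces A's any()-vs-first priority test by a distinct-priority set count, and the
-- max/min scans by the endpoints of a sorted burst-time list: an alternative algorithm.


-- ===== PORT A =====
-- p[k] on a dict (assoc list, first match); default 0 is never used inside Pre_ (key present).
def pvGet (p : List (String × Int)) (k : String) : Int :=
  ((p.find? (fun kv => kv.1 == k)).map (·.2)).getD 0

def suggest_best_method (processes : List (List (String × Int))) : String :=
  let max_burst_time := (PySem.List.max? (processes.map (fun p => pvGet p "burst_time")) (fun x => x)).getD 0
  let min_burst_time := (PySem.List.min? (processes.map (fun p => pvGet p "burst_time")) (fun x => x)).getD 0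
  let has_priority := processes.any (fun p => pvGet p "priority" != pvGet (processes.headD []) "priority")
  if has_priority then "Priority Scheduling"
  else if max_burst_time - min_burst_time > 5 then "Shortest Job First"
  else "Round Robin"

-- ===== PORT B =====
-- Source B: set of priorities, then sorted burst times and its two endpoints.
def suggest_best_method_alt (processes : List (List (String × Int))) : String :=
  let prios : PySem.Set Int := PySem.Set.ofList (processes.map (fun p => pvGet p "priority"))
  if PySem.Set.len prios > 1 then "Priority Scheduling"
  else
    let bursts := PySem.List.sorted (processes.map (fun p => pvGet p "burst_time")) (fun x => x) false
    if PySem.List.pyGetD bursts (-1) 0 - PySem.List.pyGetD bursts 0 0 > 5 then "Shortest Job First"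
    else "Round Robin"

-- ===== PRECONDITION & SPEC =====
-- Pre_ excludes exactly where Python A raises: the empty list (ValueError from max([]))
-- and processes missing a 'burst_time' or 'priority' key (KeyError).
def Pre_suggest_best_method (processes : List (List (String × Int))) : Prop :=
  processes ≠ [] ∧ ∀ p ∈ processes,
    (p.find? (fun kv => kv.1 == "burst_time")).isSome ∧ (p.find? (fun kv => kv.1 == "priority")).isSome
instance (processes : List (List (String × Int))) : Decidable (Pre_suggest_best_method processes) := by
  unfold Pre_suggest_best_method; infer_instance

def pvWitness_suggest_best_method : (List (List (String × Int))) :=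
  [[("burst_time", 3), ("priority", 1)], [("burst_time", 10), ("priority", 1)]]

def Spec_suggest_best_method (processes : List (List (String × Int))) (out : String) : Prop := out = suggest_best_method_alt processes
instance (processes : List (List (String × Int))) (out : String) : Decidable (Spec_suggest_best_method processes out) := by unfold Spec_suggest_best_method; infer_instance

-- ===== CLAIM (what is proved, stated in full; the proofs are below) =====
def Claim_equal_suggest_best_method : Prop := ∀ (processes : List (List (String × Int))), Dom_suggest_best_method processes → Pre_suggest_best_method processes → Spec_suggest_best_method processes (suggest_best_method processes)

-- ===== LEMMAS AND PROOFS =====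

-- the distinct-count test equals "some element differs from the first"

theorem pvSetLen_gt_one_iff (x : Int) (l : List Int) :
    1 < (PySem.Set.ofList (x :: l)).length ↔ ∃ y ∈ l, y ≠ x := by
  constructor
  · intro h
    by_contra hall
    push Not at hall
    have hmem : ∀ y ∈ PySem.Set.ofList (x :: l), y = x := by
      intro y hy
      rcases List.mem_cons.mp ((PySem.Set.mem_ofList (x :: l) y).mp hy) with h1 | h1
      · exact h1
      · exact hall y h1
    have hrep := List.eq_replicate_of_mem hmem
    have hnd := PySem.Set.nodup_ofList (x :: l)
    rw [hrep] at hnd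
    have := (List.nodup_replicate).mp hnd
    omega
  · rintro ⟨y, hy, hne⟩
    have hx : x ∈ PySem.Set.ofList (x :: l) := (PySem.Set.mem_ofList _ _).mpr (by simp)
    have hyy : y ∈ PySem.Set.ofList (x :: l) := (PySem.Set.mem_ofList _ _).mpr (by simp [hy])
    have hnd := PySem.Set.nodup_ofList (x :: l)
    rcases List.getElem_of_mem hx with ⟨i, hi, hix⟩
    rcases List.getElem_of_mem hyy with ⟨j, hj, hjy⟩
    have hij : i ≠ j := by
      intro hEq; apply hne; subst hEq; rw [← hjy, hix]
    by_contra h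
    push Not at h
    omega

theorem pvSorted_head (b : Int) (t : List Int) :
    PySem.List.pyGetD (PySem.List.sorted (b :: t) (fun x : Int => x) false) 0 0 = List.foldl min b t := by
  have hne : PySem.List.sorted (b :: t) (fun x : Int => x) false ≠ [] := by
    simp [PySem.List.sorted_eq_nil_iff]
  rcases hs : PySem.List.sorted (b :: t) (fun x : Int => x) false with _ | ⟨m, r⟩
  · exact absurd hs hne
  · rw [PySem.List.pyGetD_zero_cons]
    have hmin := PySem.List.min?_id_cons b t
    have hmem := PySem.List.min?_mem hmin
    have hisMin := PySem.List.min?_isMin hmin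
    have hmlo := PySem.List.key_head_sorted_le (b :: t) (fun x : Int => x) hs
    have hmmem : m ∈ b :: t := by
      rw [← PySem.List.mem_sorted (b :: t) (fun x : Int => x) false, hs]; simp
    exact le_antisymm (hmlo _ hmem) (hisMin m hmmem)

theorem pvSorted_last (b : Int) (t : List Int) :
    PySem.List.pyGetD (PySem.List.sorted (b :: t) (fun x : Int => x) false) (-1) 0 = List.foldl max b t := by
  have hne : PySem.List.sorted (b :: t) (fun x : Int => x) false ≠ [] := by
    simp [PySem.List.sorted_eq_nil_iff]
  rw [PySem.List.pyGetD_neg_one _ _ hne]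
  have hmax := PySem.List.max?_id_cons b t
  have hmem := PySem.List.max?_mem hmax
  have hisMax := PySem.List.max?_isMax hmax
  have hlast_mem : (PySem.List.sorted (b :: t) (fun x : Int => x) false).getLast hne ∈ b :: t := by
    rw [← PySem.List.mem_sorted (b :: t) (fun x : Int => x) false]
    exact List.getLast_mem hne
  apply le_antisymm (hisMax _ hlast_mem)
  rcases List.getElem_of_mem ((PySem.List.mem_sorted (b :: t) (fun x : Int => x) false _).mpr hmem) with ⟨p, hp, hpe⟩
  have hpos : 0 < (PySem.List.sorted (b :: t) (fun x : Int => x) false).length :=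
    List.length_pos_iff.mpr hne
  have hmono := PySem.List.key_sorted_getElem_mono (b :: t) (fun x : Int => x)
      (p := p) (q := (PySem.List.sorted (b :: t) (fun x : Int => x) false).length - 1) (by omega) (by omega)
  rw [List.getLast_eq_getElem]
  simpa [hpe] using hmono

-- the two priority conditions agree
theorem pvPrioCond (p0 : List (String × Int)) (t : List (List (String × Int))) :
    ((p0 :: t).any (fun p => pvGet p "priority" != pvGet p0 "priority"))
      = decide (1 < PySem.Set.len (PySem.Set.ofList ((p0 :: t).map (fun p => pvGet p "priority")))) := by
  rw [Bool.eq_iff_iff]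
  simp only [List.any_eq_true, decide_eq_true_eq, List.map_cons, PySem.Set.len,
    Nat.one_lt_cast, pvSetLen_gt_one_iff, bne_iff_ne, List.mem_cons, List.mem_map]
  constructor
  · rintro ⟨p, hp | hp, hne⟩
    · exact absurd rfl (hp ▸ hne)
    · exact ⟨_, ⟨p, hp, rfl⟩, hne⟩
  · rintro ⟨y, ⟨p, hp, rfl⟩, hne⟩
    exact ⟨p, Or.inr hp, hne⟩

-- ===== VERDICT (by name: the statement is the Claim_ definition above) =====
theorem suggest_best_method_spec : Claim_equal_suggest_best_method := by
  unfold Claim_equal_suggest_best_method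
  intro processes _ hpre
  unfold Spec_suggest_best_method
  obtain ⟨hne, -⟩ := hpre
  match processes, hne with
  | p0 :: t, _ =>
    simp only [suggest_best_method, suggest_best_method_alt, List.map_cons, List.headD_cons,
      PySem.List.max?_id_cons, PySem.List.min?_id_cons, Option.getD_some,
      pvSorted_head, pvSorted_last, pvPrioCond, List.map_cons, decide_eq_true_eq]
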